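-- pv_equiv track=rewrite | github.com/kk12345-png/BinarySearchTree | programPS19Q2.py | getPhotographerIdleTime
-- ===== SOURCE A (Python) =====
-- def getPhotographerIdleTime(products):
--     #Declare three variables as counters for idleTime, Staging Time and PhotoShoot Time. Also initialize variable i with value 0
--     idleTime = 0
--     staging_time = 0
--     photo_time = 0
--     i = 0
--     #Now, loop over array . Update the staging time and photo time in each loop by adding the value in current loop to previous value
--     while i < len(products):
--         staging_time += products[i][0]
--         photo_time += products[i][1]
--         #For the first product in array, the idle Time is equal to staging time, as photo shoot requires at least one product to be staged
--         if i == 0: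
--             idleTime += staging_time
--         else:
--             #If current value of photo shoot time is less than that of staging time , it means photographer has to wait till staging of next product is complete.
--             if photo_time < staging_time:
--                 idleTime += staging_time - photo_time
--         i += 1
--     return idleTime
-- ===== SOURCE B (Python) =====
-- def getPhotographerIdleTime(products):
--     if not products:
--         return 0
--     # phase 1: prefix sums of staging and photo durations
--     staging = []
--     total = 0
--     for st, _ in products:
--         total += st
--         staging.append(total)
--     photo = []
--     total = 0
--     for _, ph in products:
--         total += ph
--         photo.append(total)
--     # phase 2: idle = first staging total, plus every later positive gap
--     idle = staging[0]
--     for s, p in zip(staging[1:], photo[1:]):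
--         if p < s:
--             idle += s - p
--     return idle
-- ===== Notes on version B (the rewrite author's own statement) =====
-- stated objective: alternative
-- what changed: Replaces A's single while-loop with running counters by a two-phase decomposition: first build the staging and photo prefix-sum lists, then a second pass over the zipped tails accumulates the positive gaps, starting from the first staging total.
import Mathlib
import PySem

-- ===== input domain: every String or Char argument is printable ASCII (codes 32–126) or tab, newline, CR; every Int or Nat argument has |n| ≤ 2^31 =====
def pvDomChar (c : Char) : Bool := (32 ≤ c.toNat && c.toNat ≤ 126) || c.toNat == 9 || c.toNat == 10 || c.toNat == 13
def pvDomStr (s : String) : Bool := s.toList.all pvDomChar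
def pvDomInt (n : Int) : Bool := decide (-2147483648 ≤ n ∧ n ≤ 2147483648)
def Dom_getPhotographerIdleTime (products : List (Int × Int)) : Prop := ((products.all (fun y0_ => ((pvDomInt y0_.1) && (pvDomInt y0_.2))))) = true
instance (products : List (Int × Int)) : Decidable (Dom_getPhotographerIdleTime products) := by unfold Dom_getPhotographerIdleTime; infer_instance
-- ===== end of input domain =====

-- B re-implements A's single counter loop as two phases: prefix-sum lists, then a gap-summing pass (same cost, different decomposition).


-- ===== PORT A =====
-- while loop over the remaining products, keeping idle/staging/photo counters and the index i
def pvLoopA : List (Int × Int) → Int → Int → Int → Nat → Int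
  | [], idleTime, _, _, _ => idleTime
  | p :: rest, idleTime, staging_time, photo_time, i =>
    let staging_time' := staging_time + p.1
    let photo_time' := photo_time + p.2
    let idleTime' :=
      if i = 0 then idleTime + staging_time'
      else if photo_time' < staging_time' then idleTime + (staging_time' - photo_time')
      else idleTime
    pvLoopA rest idleTime' staging_time' photo_time' (i + 1)

def getPhotographerIdleTime (products : List (Int × Int)) : Int :=
  pvLoopA products 0 0 0 0

-- ===== PORT B =====
-- prefix sums of a list of Ints starting from running total s
def pvPrefixSums : List Int → Int → List Int
  | [], _ => []
  | x :: rest, total => (total + x) :: pvPrefixSums rest (total + x)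

def getPhotographerIdleTime_alt (products : List (Int × Int)) : Int :=
  match products with
  | [] => 0
  | _ =>
    let staging := pvPrefixSums (products.map Prod.fst) 0
    let photo := pvPrefixSums (products.map Prod.snd) 0
    let idle := staging.headD 0
    ((staging.drop 1).zip (photo.drop 1)).foldl
      (fun idle sp => if sp.2 < sp.1 then idle + (sp.1 - sp.2) else idle) idle

-- ===== PRECONDITION & SPEC =====
def Spec_getPhotographerIdleTime (products : List (Int × Int)) (out : Int) : Prop := out = getPhotographerIdleTime_alt products
instance (products : List (Int × Int)) (out : Int) : Decidable (Spec_getPhotographerIdleTime products out) := by unfold Spec_getPhotographerIdleTime; infer_instance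

-- ===== CLAIM (what is proved, stated in full; the proofs are below) =====
def Claim_equal_getPhotographerIdleTime : Prop := ∀ (products : List (Int × Int)), Dom_getPhotographerIdleTime products → Spec_getPhotographerIdleTime products (getPhotographerIdleTime products)

-- ===== LEMMAS AND PROOFS =====
-- common core: sum over the tail of the positive (staging - photo) gaps, given running totals s p
def pvCore : List (Int × Int) → Int → Int → Int
  | [], _, _ => 0
  | q :: rest, s, p =>
    (if p + q.2 < s + q.1 then (s + q.1) - (p + q.2) else 0) + pvCore rest (s + q.1) (p + q.2)

theorem pvLoopA_core (xs : List (Int × Int)) : ∀ idle s p i, i ≠ 0 →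
    pvLoopA xs idle s p i = idle + pvCore xs s p := by
  induction xs with
  | nil => intro idle s p i _; simp [pvLoopA, pvCore]
  | cons q rest ih =>
    intro idle s p i hi
    simp only [pvLoopA, pvCore, if_neg hi]
    rw [ih _ _ _ (i + 1) (Nat.succ_ne_zero i)]
    split_ifs <;> ring

theorem pvFoldB_core (xs : List (Int × Int)) : ∀ s p idle,
    ((pvPrefixSums (xs.map Prod.fst) s).zip (pvPrefixSums (xs.map Prod.snd) p)).foldl
      (fun idle sp => if sp.2 < sp.1 then idle + (sp.1 - sp.2) else idle) idle
    = idle + pvCore xs s p := by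
  induction xs with
  | nil => intro s p idle; simp [pvPrefixSums, pvCore]
  | cons q rest ih =>
    intro s p idle
    simp only [List.map_cons, pvPrefixSums, List.zip_cons_cons, List.foldl_cons, pvCore]
    rw [ih]
    split_ifs <;> ring

-- ===== VERDICT (by name: the statement is the Claim_ definition above) =====
theorem getPhotographerIdleTime_spec : Claim_equal_getPhotographerIdleTime := by
  intro products _
  unfold Spec_getPhotographerIdleTime getPhotographerIdleTime getPhotographerIdleTime_alt
  match products with
  | [] => simp [pvLoopA]
  | q :: rest =>
    simp only [pvLoopA, List.map_cons, pvPrefixSums, List.headD_cons, List.drop_succ_cons,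
      List.drop_zero]
    rw [pvLoopA_core rest _ _ _ 1 (by decide), pvFoldB_core]
    simp
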